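-- pv_equiv track=rewrite | github.com/goldPig888/USACO-Bronze-Practice | USACOPracB/cropHarvester.py | calculateCovered
-- ===== SOURCE A (Python) =====
-- def calculateCovered(rect1, rect2):
--     x1, y1, x2, y2 = rect1
--     x3, y3, x4, y4 = rect2
--     corners = [(x1, y1), (x1, y2), (x2, y1), (x2, y2)]
--     count = 0
--     for corner in corners:
--         x, y = corner
--
--         if x >= x3 and x <= x4 and y >= y3 and y <= y4:
--             count += 1
--
--     return count
-- ===== SOURCE B (Python) =====
-- def calculateCovered(rect1, rect2):
--     x1, y1, x2, y2 = rect1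
--     x3, y3, x4, y4 = rect2
--     xc = (x3 <= x1 <= x4) + (x3 <= x2 <= x4)
--     yc = (y3 <= y1 <= y4) + (y3 <= y2 <= y4)
--     return xc * yc
-- ===== Notes on version B (the rewrite author's own statement) =====
-- stated objective: simpler
-- what changed: Replaced the loop over the four corners by a per-axis factorization: the count of corners inside rect2 equals the product of the per-axis in-range counts.
import Mathlib
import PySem

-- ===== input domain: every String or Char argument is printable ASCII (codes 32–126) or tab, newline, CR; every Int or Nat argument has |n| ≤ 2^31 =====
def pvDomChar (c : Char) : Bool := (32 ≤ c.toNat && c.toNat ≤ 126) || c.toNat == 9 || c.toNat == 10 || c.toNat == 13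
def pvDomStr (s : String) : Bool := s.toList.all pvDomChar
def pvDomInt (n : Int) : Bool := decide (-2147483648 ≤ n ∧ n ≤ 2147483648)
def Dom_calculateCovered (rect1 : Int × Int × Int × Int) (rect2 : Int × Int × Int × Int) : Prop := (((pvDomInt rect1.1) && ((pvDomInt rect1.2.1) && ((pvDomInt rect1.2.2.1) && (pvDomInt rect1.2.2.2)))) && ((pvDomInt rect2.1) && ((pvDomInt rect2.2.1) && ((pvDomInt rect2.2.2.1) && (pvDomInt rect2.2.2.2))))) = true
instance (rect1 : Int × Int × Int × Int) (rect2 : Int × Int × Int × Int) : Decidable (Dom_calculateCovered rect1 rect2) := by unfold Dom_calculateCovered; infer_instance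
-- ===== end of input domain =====

-- B replaces A's corner loop by the product of per-axis in-range counts (simpler decomposition).


-- ===== PORT A =====
-- Port of A: fold over the explicit corner list, incrementing a counter.
def calculateCovered (rect1 : Int × Int × Int × Int) (rect2 : Int × Int × Int × Int) : Int :=
  match rect1, rect2 with
  | (x1, y1, x2, y2), (x3, y3, x4, y4) =>
    let corners : List (Int × Int) := [(x1, y1), (x1, y2), (x2, y1), (x2, y2)]
    corners.foldl (fun count corner =>
      let x := corner.1
      let y := corner.2
      if x ≥ x3 ∧ x ≤ x4 ∧ y ≥ y3 ∧ y ≤ y4 then count + 1 else count) 0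

-- ===== PORT B =====
-- B: product of per-axis in-range counts (no corner enumeration).
def calculateCovered_alt (rect1 : Int × Int × Int × Int) (rect2 : Int × Int × Int × Int) : Int :=
  match rect1, rect2 with
  | (x1, y1, x2, y2), (x3, y3, x4, y4) =>
    let xc : Int := (if x3 ≤ x1 ∧ x1 ≤ x4 then 1 else 0) + (if x3 ≤ x2 ∧ x2 ≤ x4 then 1 else 0)
    let yc : Int := (if y3 ≤ y1 ∧ y1 ≤ y4 then 1 else 0) + (if y3 ≤ y2 ∧ y2 ≤ y4 then 1 else 0)
    xc * yc

-- ===== PRECONDITION & SPEC =====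
def Spec_calculateCovered (rect1 : Int × Int × Int × Int) (rect2 : Int × Int × Int × Int) (out : Int) : Prop := out = calculateCovered_alt rect1 rect2
instance (rect1 : Int × Int × Int × Int) (rect2 : Int × Int × Int × Int) (out : Int) : Decidable (Spec_calculateCovered rect1 rect2 out) := by unfold Spec_calculateCovered; infer_instance

-- ===== CLAIM (what is proved, stated in full; the proofs are below) =====
def Claim_equal_calculateCovered : Prop := ∀ (rect1 : Int × Int × Int × Int) (rect2 : Int × Int × Int × Int), Dom_calculateCovered rect1 rect2 → Spec_calculateCovered rect1 rect2 (calculateCovered rect1 rect2)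

-- ===== LEMMAS AND PROOFS =====

-- ===== VERDICT (by name: the statement is the Claim_ definition above) =====
theorem calculateCovered_spec : Claim_equal_calculateCovered := by
  intro rect1 rect2 _
  obtain ⟨x1, y1, x2, y2⟩ := rect1
  obtain ⟨x3, y3, x4, y4⟩ := rect2
  unfold Spec_calculateCovered calculateCovered calculateCovered_alt
  simp only [List.foldl]
  split_ifs <;> omega
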